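-- pv_equiv track=rewrite | github.com/zxkiidev/Iridium-Language | src/main.py | _recolectar_bloque_end
-- ===== SOURCE A (Python) =====
-- def _recolectar_bloque_end(lineas, start, end_idx):
--     """Recolecta líneas hasta encontrar 'end'. Retorna (lines, next_i)."""
--     body  = []
--     i     = start
--     depth = 1
--     while i < end_idx:
--         raw = lineas[i] if isinstance(lineas[i], str) else str(lineas[i])
--         l   = raw.strip()
--         if (l.startswith("while ") or l.startswith("for ") or
--             l.startswith("secure:") or l.startswith("class ") or
--             l.startswith("function ")) and l.endswith(":"):
--             depth += 1
--         if l == "end":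
--             depth -= 1
--             if depth == 0:
--                 return body, i + 1
--         body.append(raw)
--         i += 1
--     return body, i
-- ===== SOURCE B (Python) =====
-- def _es_abridor(l):
--     return (l.startswith("while ") or l.startswith("for ") or
--             l.startswith("secure:") or l.startswith("class ") or
--             l.startswith("function ")) and l.endswith(":")
--
-- def _bloque_interno(lineas, i, end_idx):
--     # Lines of one nested block INCLUDING its closing 'end', plus the next index.
--     body = []
--     while i < end_idx:
--         raw = lineas[i] if isinstance(lineas[i], str) else str(lineas[i])
--         l = raw.strip()
--         body.append(raw)
--         if l == "end":
--             return body, i + 1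
--         if _es_abridor(l):
--             inner, i = _bloque_interno(lineas, i + 1, end_idx)
--             body.extend(inner)
--         else:
--             i += 1
--     return body, i
--
-- def _recolectar_bloque_end(lineas, start, end_idx):
--     """Recursive descent over the nested block structure (top level excludes its 'end')."""
--     body = []
--     i = start
--     while i < end_idx:
--         raw = lineas[i] if isinstance(lineas[i], str) else str(lineas[i])
--         l = raw.strip()
--         if l == "end":
--             return body, i + 1
--         body.append(raw)
--         if _es_abridor(l):
--             inner, i = _bloque_interno(lineas, i + 1, end_idx)
--             body.extend(inner)
--         else:
--             i += 1
--     return body, i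
-- ===== Notes on version B (the rewrite author's own statement) =====
-- stated objective: alternative
-- what changed: Replaces A's single flat while-loop with an integer depth counter by recursive descent over the nested block structure: on each block-opener line the inner block (including its closing 'end') is collected recursively and the walk resumes at the returned index.
import Mathlib
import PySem

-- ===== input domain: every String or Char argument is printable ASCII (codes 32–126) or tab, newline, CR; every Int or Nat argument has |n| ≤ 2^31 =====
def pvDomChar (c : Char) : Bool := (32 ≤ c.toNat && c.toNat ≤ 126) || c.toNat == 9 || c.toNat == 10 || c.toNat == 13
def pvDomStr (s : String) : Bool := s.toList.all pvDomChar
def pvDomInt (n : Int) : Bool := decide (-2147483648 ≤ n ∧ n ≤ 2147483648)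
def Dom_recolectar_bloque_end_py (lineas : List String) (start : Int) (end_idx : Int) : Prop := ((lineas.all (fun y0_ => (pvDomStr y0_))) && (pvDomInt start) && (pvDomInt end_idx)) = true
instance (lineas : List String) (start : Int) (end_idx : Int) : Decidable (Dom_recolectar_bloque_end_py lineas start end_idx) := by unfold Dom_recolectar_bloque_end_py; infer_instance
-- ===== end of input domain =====

-- B replaces A's flat while-loop with a depth counter by recursive descent over the
-- nested block structure (objective: alternative decomposition, same cost).

-- ===== PORT A =====
-- A's while-loop: i, depth and the accumulated body are the loop state.
def recolectarLoopA (lineas : List String) (end_idx : Int) (body : List String)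
    (i : Int) (depth : Int) : List String × Int :=
  if _h : i < end_idx then
    match PySem.List.pyGet? lineas i with
    | none => (body, i)   -- Python raises IndexError here; excluded by Pre_
    | some raw =>
      let l := PySem.Str.strip raw
      let depth1 :=
        if (PySem.Str.startswith l "while " || PySem.Str.startswith l "for " ||
            PySem.Str.startswith l "secure:" || PySem.Str.startswith l "class " ||
            PySem.Str.startswith l "function ") && PySem.Str.endswith l ":" then
          depth + 1
        else depth
      if l == "end" then
        if depth1 - 1 == 0 then (body, i + 1)
        else recolectarLoopA lineas end_idx (body ++ [raw]) (i + 1) (depth1 - 1)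
      else recolectarLoopA lineas end_idx (body ++ [raw]) (i + 1) depth1
  else (body, i)
termination_by (end_idx - i).toNat
decreasing_by all_goals omega

def recolectar_bloque_end_py (lineas : List String) (start : Int) (end_idx : Int) : List String × Int :=
  recolectarLoopA lineas end_idx [] start 1

-- ===== PORT B =====
def esAbridor (l : String) : Bool :=
  (PySem.Str.startswith l "while " || PySem.Str.startswith l "for " ||
   PySem.Str.startswith l "secure:" || PySem.Str.startswith l "class " ||
   PySem.Str.startswith l "function ") && PySem.Str.endswith l ":"

-- _bloque_interno: lines of one nested block INCLUDING its closing 'end', plus next index.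
-- fuel only makes the nested recursion structural; it is ≥ the remaining line count at every call.
def bloqueInternoB (lineas : List String) (end_idx : Int) : Nat → Int → List String × Int
  | 0, i => ([], i)
  | Nat.succ fuel, i =>
    if i < end_idx then
      match PySem.List.pyGet? lineas i with
      | none => ([], i)   -- Python raises IndexError here; excluded by Pre_
      | some raw =>
        let l := PySem.Str.strip raw
        if l == "end" then ([raw], i + 1)
        else if esAbridor l then
          let r1 := bloqueInternoB lineas end_idx fuel (i + 1)
          let r2 := bloqueInternoB lineas end_idx fuel r1.2
          (raw :: (r1.1 ++ r2.1), r2.2)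
        else
          let r := bloqueInternoB lineas end_idx fuel (i + 1)
          (raw :: r.1, r.2)
    else ([], i)

-- top level: same walk, but the matching 'end' is not included in the body.
def recolectarTopB (lineas : List String) (end_idx : Int) : Nat → Int → List String × Int
  | 0, i => ([], i)
  | Nat.succ fuel, i =>
    if i < end_idx then
      match PySem.List.pyGet? lineas i with
      | none => ([], i)   -- Python raises IndexError here; excluded by Pre_
      | some raw =>
        let l := PySem.Str.strip raw
        if l == "end" then ([], i + 1)
        else if esAbridor l then
          let r1 := bloqueInternoB lineas end_idx fuel (i + 1)
          let r2 := recolectarTopB lineas end_idx fuel r1.2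
          (raw :: (r1.1 ++ r2.1), r2.2)
        else
          let r := recolectarTopB lineas end_idx fuel (i + 1)
          (raw :: r.1, r.2)
    else ([], i)

def recolectar_bloque_end_py_alt (lineas : List String) (start : Int) (end_idx : Int) : List String × Int :=
  recolectarTopB lineas end_idx ((end_idx - start).toNat + 1) start

-- ===== PRECONDITION & SPEC =====
-- Helpers of Pre_ only (they do not touch either port): the stripped line Python's
-- lineas[j] yields, whether it is 'end', and whether it is a block-opener.
def preLinea (lineas : List String) (j : Int) : String :=
  PySem.Str.strip ((PySem.List.pyGet? lineas j).getD "")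
def preEsEnd (lineas : List String) (j : Int) : Bool := preLinea lineas j == "end"
def preEsAbre (lineas : List String) (j : Int) : Bool :=
  (PySem.Str.startswith (preLinea lineas j) "while " || PySem.Str.startswith (preLinea lineas j) "for " ||
   PySem.Str.startswith (preLinea lineas j) "secure:" || PySem.Str.startswith (preLinea lineas j) "class " ||
   PySem.Str.startswith (preLinea lineas j) "function ") && PySem.Str.endswith (preLinea lineas j) ":"
-- The matching 'end' of the block occurs among the first n lines from start:
-- some offset k is an 'end' line with equally many 'end's and openers before it.
def preHallaEnd (lineas : List String) (start : Int) (n : Nat) : Bool :=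
  (List.range n).any (fun k =>
    preEsEnd lineas (start + k) &&
    ((List.range k).countP (fun m => preEsEnd lineas (start + m)) ==
     (List.range k).countP (fun m => preEsAbre lineas (start + m))))

-- Pre_ is exactly the inputs on which A returns (no IndexError): if the scan window is
-- nonempty, start is a valid Python index, and either the window stays inside the list
-- or the block's matching 'end' occurs before the list runs out.
def Pre_recolectar_bloque_end_py (lineas : List String) (start : Int) (end_idx : Int) : Prop :=
  start < end_idx →
    (-(lineas.length : Int) ≤ start ∧ start < (lineas.length : Int) ∧
     (end_idx ≤ (lineas.length : Int) ∨
      preHallaEnd lineas start ((lineas.length : Int) - start).toNat = true))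
instance (lineas : List String) (start : Int) (end_idx : Int) : Decidable (Pre_recolectar_bloque_end_py lineas start end_idx) := by unfold Pre_recolectar_bloque_end_py; infer_instance

def pvWitness_recolectar_bloque_end_py : List String × Int × Int := (["x = 1", "end"], 0, 2)

def Spec_recolectar_bloque_end_py (lineas : List String) (start : Int) (end_idx : Int) (out : List String × Int) : Prop := out = recolectar_bloque_end_py_alt lineas start end_idx
instance (lineas : List String) (start : Int) (end_idx : Int) (out : List String × Int) : Decidable (Spec_recolectar_bloque_end_py lineas start end_idx out) := by unfold Spec_recolectar_bloque_end_py; infer_instance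

-- ===== CLAIM (what is proved, stated in full; the proofs are below) =====
def Claim_equal_recolectar_bloque_end_py : Prop := ∀ (lineas : List String) (start : Int) (end_idx : Int), Dom_recolectar_bloque_end_py lineas start end_idx → Pre_recolectar_bloque_end_py lineas start end_idx → Spec_recolectar_bloque_end_py lineas start end_idx (recolectar_bloque_end_py lineas start end_idx)

-- ===== LEMMAS AND PROOFS =====
-- The two ports are in fact equal on every input (both stop with the body so far at an
-- out-of-range index); the proof therefore never needs Pre_, which only marks, for the
-- behavioural comparison with Python, the inputs where A returns instead of raising.

theorem internoB_mono (lineas : List String) (e : Int) :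
    ∀ (f : Nat) (i : Int), i ≤ (bloqueInternoB lineas e f i).2 := by
  intro f
  induction f with
  | zero => intro i; simp [bloqueInternoB]
  | succ f ih =>
    intro i
    rw [bloqueInternoB]
    split_ifs with hlt
    · cases hg : PySem.List.pyGet? lineas i with
      | none => simp
      | some raw =>
        dsimp only
        split_ifs with hend hop
        · simp
        · dsimp only
          have h1 := ih (i + 1)
          have h2 := ih (bloqueInternoB lineas e f (i + 1)).2
          omega
        · have h1 := ih (i + 1); dsimp only; omega
    · simp

theorem loopA_interno (lineas : List String) (e : Int) :
    ∀ (n : Nat) (i : Int) (d : Int) (body : List String),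
      (e - i).toNat ≤ n → 1 ≤ d →
      recolectarLoopA lineas e body i (d + 1) =
        recolectarLoopA lineas e (body ++ (bloqueInternoB lineas e n i).1)
          (bloqueInternoB lineas e n i).2 d := by
  intro n
  induction n with
  | zero =>
    intro i d body hn hd
    have hi : ¬ i < e := by omega
    rw [recolectarLoopA]
    simp only [bloqueInternoB]
    rw [recolectarLoopA]
    simp [hi]
  | succ n ih =>
    intro i d body hn hd
    by_cases hlt : i < e
    · cases hg : PySem.List.pyGet? lineas i with
      | none =>
        rw [recolectarLoopA, dif_pos hlt, hg]
        conv_rhs => rw [bloqueInternoB]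
        rw [if_pos hlt, hg]
        rw [recolectarLoopA, dif_pos hlt, hg]
        simp
      | some raw =>
        rw [recolectarLoopA, dif_pos hlt]
        conv_rhs => rw [bloqueInternoB]
        rw [if_pos hlt, hg]
        simp only [esAbridor]
        by_cases hl : PySem.Str.strip raw = "end"
        · have hab : ((PySem.Str.startswith (PySem.Str.strip raw) "while " ||
              PySem.Str.startswith (PySem.Str.strip raw) "for " ||
              PySem.Str.startswith (PySem.Str.strip raw) "secure:" ||
              PySem.Str.startswith (PySem.Str.strip raw) "class " ||
              PySem.Str.startswith (PySem.Str.strip raw) "function ") &&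
              PySem.Str.endswith (PySem.Str.strip raw) ":") = false := by
            rw [hl]; decide
          have hendb : (PySem.Str.strip raw == "end") = true := by simp [hl]
          have hzf : ((d : Int) == 0) = false := by
            rw [beq_eq_false_iff_ne]; omega
          simp only [hab, hendb, hzf, Bool.false_eq_true, if_true, if_false,
            add_sub_cancel_right]
        · have hendb : (PySem.Str.strip raw == "end") = false := beq_eq_false_iff_ne.mpr hl
          by_cases hab : ((PySem.Str.startswith (PySem.Str.strip raw) "while " ||
              PySem.Str.startswith (PySem.Str.strip raw) "for " ||
              PySem.Str.startswith (PySem.Str.strip raw) "secure:" ||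
              PySem.Str.startswith (PySem.Str.strip raw) "class " ||
              PySem.Str.startswith (PySem.Str.strip raw) "function ") &&
              PySem.Str.endswith (PySem.Str.strip raw) ":") = true
          · simp only [hab, hendb, Bool.false_eq_true, if_true, if_false]
            have step1 := ih (i + 1) (d + 1) (body ++ [raw]) (by omega) (by omega)
            rw [step1]
            have hm1 : i + 1 ≤ (bloqueInternoB lineas e n (i + 1)).2 := internoB_mono lineas e n (i + 1)
            have step2 := ih (bloqueInternoB lineas e n (i + 1)).2 d
              (body ++ [raw] ++ (bloqueInternoB lineas e n (i + 1)).1) (by omega) hd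
            rw [step2]
            simp
          · have hab' : ((PySem.Str.startswith (PySem.Str.strip raw) "while " ||
              PySem.Str.startswith (PySem.Str.strip raw) "for " ||
              PySem.Str.startswith (PySem.Str.strip raw) "secure:" ||
              PySem.Str.startswith (PySem.Str.strip raw) "class " ||
              PySem.Str.startswith (PySem.Str.strip raw) "function ") &&
              PySem.Str.endswith (PySem.Str.strip raw) ":") = false :=
              Bool.not_eq_true _ ▸ by simpa using hab
            simp only [hab', hendb, Bool.false_eq_true, if_false]
            have step1 := ih (i + 1) d (body ++ [raw]) (by omega) hd
            rw [step1]
            simp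
    · rw [recolectarLoopA]
      conv_rhs => rw [bloqueInternoB]
      rw [recolectarLoopA]
      simp [hlt]

theorem loopA_top (lineas : List String) (e : Int) :
    ∀ (n : Nat) (i : Int) (body : List String),
      (e - i).toNat ≤ n →
      recolectarLoopA lineas e body i 1 =
        (body ++ (recolectarTopB lineas e n i).1, (recolectarTopB lineas e n i).2) := by
  intro n
  induction n with
  | zero =>
    intro i body hn
    have hi : ¬ i < e := by omega
    rw [recolectarLoopA]
    simp only [recolectarTopB]
    simp [hi]
  | succ n ih =>
    intro i body hn
    by_cases hlt : i < e
    · cases hg : PySem.List.pyGet? lineas i with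
      | none =>
        rw [recolectarLoopA, dif_pos hlt, hg]
        conv_rhs => rw [recolectarTopB]
        rw [if_pos hlt, hg]
        simp
      | some raw =>
        rw [recolectarLoopA, dif_pos hlt]
        conv_rhs => rw [recolectarTopB]
        rw [if_pos hlt, hg]
        simp only [esAbridor]
        by_cases hl : PySem.Str.strip raw = "end"
        · have hab : ((PySem.Str.startswith (PySem.Str.strip raw) "while " ||
              PySem.Str.startswith (PySem.Str.strip raw) "for " ||
              PySem.Str.startswith (PySem.Str.strip raw) "secure:" ||
              PySem.Str.startswith (PySem.Str.strip raw) "class " ||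
              PySem.Str.startswith (PySem.Str.strip raw) "function ") &&
              PySem.Str.endswith (PySem.Str.strip raw) ":") = false := by
            rw [hl]; decide
          have hendb : (PySem.Str.strip raw == "end") = true := by simp [hl]
          have h10 : ((1 - 1 : Int) == 0) = true := by decide
          simp only [hab, hendb, Bool.false_eq_true, if_false, h10, if_true, List.append_nil]
        · have hendb : (PySem.Str.strip raw == "end") = false := beq_eq_false_iff_ne.mpr hl
          by_cases hab : ((PySem.Str.startswith (PySem.Str.strip raw) "while " ||
              PySem.Str.startswith (PySem.Str.strip raw) "for " ||
              PySem.Str.startswith (PySem.Str.strip raw) "secure:" ||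
              PySem.Str.startswith (PySem.Str.strip raw) "class " ||
              PySem.Str.startswith (PySem.Str.strip raw) "function ") &&
              PySem.Str.endswith (PySem.Str.strip raw) ":") = true
          · simp only [hab, hendb, Bool.false_eq_true, if_true, if_false]
            have step1 := loopA_interno lineas e n (i + 1) 1 (body ++ [raw]) (by omega) (by omega)
            rw [step1]
            have hm1 : i + 1 ≤ (bloqueInternoB lineas e n (i + 1)).2 := internoB_mono lineas e n (i + 1)
            have step2 := ih (bloqueInternoB lineas e n (i + 1)).2
              (body ++ [raw] ++ (bloqueInternoB lineas e n (i + 1)).1) (by omega)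
            rw [step2]
            simp
          · have hab' : ((PySem.Str.startswith (PySem.Str.strip raw) "while " ||
              PySem.Str.startswith (PySem.Str.strip raw) "for " ||
              PySem.Str.startswith (PySem.Str.strip raw) "secure:" ||
              PySem.Str.startswith (PySem.Str.strip raw) "class " ||
              PySem.Str.startswith (PySem.Str.strip raw) "function ") &&
              PySem.Str.endswith (PySem.Str.strip raw) ":") = false :=
              Bool.not_eq_true _ ▸ by simpa using hab
            simp only [hab', hendb, Bool.false_eq_true, if_false]
            have step1 := ih (i + 1) (body ++ [raw]) (by omega)
            rw [step1]
            simp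
    · rw [recolectarLoopA]
      conv_rhs => rw [recolectarTopB]
      simp [hlt]

-- ===== VERDICT (by name: the statement is the Claim_ definition above) =====
theorem recolectar_bloque_end_py_spec : Claim_equal_recolectar_bloque_end_py := by
  intro lineas start e _hdom _hpre
  unfold Spec_recolectar_bloque_end_py recolectar_bloque_end_py recolectar_bloque_end_py_alt
  rw [loopA_top lineas e ((e - start).toNat + 1) start [] (by omega)]
  simp
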